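-- pv_equiv track=rewrite | github.com/eugen-paul/ProblemsPython | LeetCode/Problems/1000_1999/1400_1499/1416_RestoreTheArray.py | numberOfArrays_i
-- ===== SOURCE A (Python) =====
-- def numberOfArrays_i(s: str, k: int) -> int:
--     """sample solution"""
--     m = len(s)
--     mod = 10 ** 9 + 7
--
--     # dp[i] records the number of arrays that can be printed as
--     # the prefix substring s[0 ~ i - 1]
--     dp = [1] + [0] * m
--
--     # Iterate over every digit, for each digit s[start]:
--     for start in range(m):
--         if s[start] == '0':
--             continue
--
--         # Iterate over ending digit end and find all valid numbers
--         # s[start ~ end].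
--         for end in range(start, m):
--             curr_number = s[start:end + 1]
--             if int(curr_number) > k:
--                 break
--
--             # If s[start ~ end] is valid, increment dp[end + 1] by dp[start].
--             dp[end + 1] += dp[start]
--             dp[end + 1] %= mod
--
--     return dp[-1]
-- ===== SOURCE B (Python) =====
-- def numberOfArrays_i(s: str, k: int) -> int:
--     """Sliding-window prefix-sum DP: any candidate number with fewer digits than k is
--     automatically <= k, so dp[i] is a window sum of the previous L-1 cells (via prefix
--     sums, O(1) per position) plus one explicit full-length window check."""
--     mod = 10 ** 9 + 7
--     m = len(s)
--     if k < 1: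
--         return 1 if m == 0 else 0
--     L = 0
--     t = k
--     while t > 0:
--         t //= 10
--         L += 1
--     dp = [0] * (m + 1)
--     dp[0] = 1
--     pre = [0] * (m + 1)  # pre[i] = (z[0] + ... + z[i-1]) % mod, z[j] = dp[j] if s[j] != '0' else 0
--     for i in range(1, m + 1):
--         z = dp[i - 1] if s[i - 1] != '0' else 0
--         pre[i] = (pre[i - 1] + z) % mod
--         lo = max(0, i - (L - 1))
--         acc = pre[i] - pre[lo]
--         if i >= L and s[i - L] != '0' and int(s[i - L:i]) <= k:
--             acc += dp[i - L]
--         dp[i] = acc % mod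
--     return dp[m]
-- ===== Notes on version B (the rewrite author's own statement) =====
-- stated objective: faster
-- what changed: Replaces the nested push-DP (for each start, extend the window and re-parse int(s[start:end+1]) until it exceeds k) by a sliding-window prefix-sum DP: since any number with fewer digits than k is automatically <= k, dp[i] is computed in O(1) as a prefix-sum window difference over the previous L-1 cells plus one explicit check of the single full-length window.
import Mathlib
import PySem

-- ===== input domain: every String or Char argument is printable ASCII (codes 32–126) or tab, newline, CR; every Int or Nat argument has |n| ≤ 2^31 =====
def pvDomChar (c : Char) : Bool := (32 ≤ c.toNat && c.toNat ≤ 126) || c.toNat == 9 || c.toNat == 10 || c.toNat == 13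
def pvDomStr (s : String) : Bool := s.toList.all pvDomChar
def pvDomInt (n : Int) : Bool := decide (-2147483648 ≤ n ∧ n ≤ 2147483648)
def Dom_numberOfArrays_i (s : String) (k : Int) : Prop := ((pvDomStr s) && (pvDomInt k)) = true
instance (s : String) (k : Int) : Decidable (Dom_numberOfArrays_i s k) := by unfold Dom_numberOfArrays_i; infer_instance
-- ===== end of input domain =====

-- B replaces A's nested window-scan DP by a sliding-window prefix-sum DP: numbers with
-- fewer digits than k are automatically ≤ k, so each dp cell is a prefix-sum window
-- difference plus one explicit full-length window check.

-- ===== PORT A =====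

-- int(cs) for the all-digit strings Pre_ admits (hand-ported because the prelude's
-- parser internals carry no reasoning lemmas): exact on nonempty all-digit strings,
-- none (= ValueError) otherwise; inside Pre_ every string int() sees here is all-digit.
def pvInt? (cs : List Char) : Option Int :=
  if cs ≠ [] ∧ cs.all Char.isDigit then
    some (cs.foldl (fun a c => 10 * a + (((PySem.Int.digitVal? c).getD 0 : Nat) : Int)) 0)
  else none

-- the inner `for end in range(start, m): … break …` loop of A; dp is the list
-- dp[0..m] modelled as an index map
def pvInnerA (l : List Char) (k : Int) (start : Nat) (e : Nat) (dp : Nat → Int) : Nat → Int :=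
  if _h : e < l.length then
    match pvInt? (PySem.List.slice l (some (start : Int)) (some ((e : Int) + 1))) with
    | none => dp            -- int(curr_number) raises ValueError; excluded by Pre_
    | some v =>
      if v > k then dp      -- break
      else                  -- dp[end+1] += dp[start]; dp[end+1] %= mod
        pvInnerA l k start (e + 1)
          (fun j => if j = e + 1 then PySem.Int.mod (dp (e + 1) + dp start) 1000000007 else dp j)
  else dp
termination_by l.length - e

def numberOfArrays_i (s : String) (k : Int) : Int :=
  let l := s.toList
  let m := l.length
  -- dp = [1] + [0] * m, as an index map; dp[-1] is dp m
  let dp := (List.range m).foldl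
    (fun dp start =>
      if l.getD start ' ' = '0' then dp      -- s[start] == '0': continue
      else pvInnerA l k start start dp)
    (fun j => if j = 0 then (1 : Int) else 0)
  dp m

-- ===== PORT B =====

-- the `while t > 0: t //= 10; L += 1` digit-count loop of B
def pvDigLen (t : Int) : Nat :=
  if _h : 0 < t then pvDigLen (PySem.Int.floordiv t 10) + 1 else 0
termination_by t.toNat
decreasing_by
  rw [PySem.Int.floordiv_eq_ediv_of_pos (by norm_num : (0:Int) < 10)]
  omega

-- `int(s[i-L:i]) <= k`, the full-length window test of B's loop
def pvFullOk (l : List Char) (k : Int) (L i : Nat) : Bool :=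
  match pvInt? (PySem.List.slice l (some ((i - L : Nat) : Int)) (some ((i : Nat) : Int))) with
  | some v => decide (v ≤ k)
  | none => false    -- int() raises ValueError; excluded by Pre_

-- the body of B's `for i in range(1, m+1)` loop; state = (dp, pre) as index maps
def pvStepB (l : List Char) (k : Int) (L : Nat) (st : (Nat → Int) × (Nat → Int)) (i : Nat) :
    (Nat → Int) × (Nat → Int) :=
  let dp := st.1
  let pre := st.2
  let z := if l.getD (i - 1) ' ' = '0' then (0 : Int) else dp (i - 1)
  let pre' := fun j => if j = i then PySem.Int.mod (pre (i - 1) + z) 1000000007 else pre j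
  let lo := i - (L - 1)        -- Nat subtraction = Python's max(0, i - (L - 1))
  let acc := pre' i - pre' lo
  let acc2 := if L ≤ i ∧ l.getD (i - L) ' ' ≠ '0' ∧ pvFullOk l k L i = true
              then acc + dp (i - L) else acc
  (fun j => if j = i then PySem.Int.mod acc2 1000000007 else dp j, pre')

def numberOfArrays_i_alt (s : String) (k : Int) : Int :=
  let l := s.toList
  let m := l.length
  if k < 1 then (if m = 0 then 1 else 0)
  else
    let L := pvDigLen k
    let st := (List.range' 1 m).foldl (pvStepB l k L)
      (fun j => if j = 0 then (1 : Int) else 0, fun _ => (0 : Int))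
    st.1 m

-- ===== PRECONDITION & SPEC =====

-- Pre_: exactly the strings on which Python A returns: as soon as s has any
-- non-digit character, A's int() raises ValueError (the first slice examined at
-- that character is that character alone).
def Pre_numberOfArrays_i (s : String) (k : Int) : Prop := (s.toList.all Char.isDigit) = true
instance (s : String) (k : Int) : Decidable (Pre_numberOfArrays_i s k) := by
  unfold Pre_numberOfArrays_i; infer_instance

def pvWitness_numberOfArrays_i : String × Int := ("1317", 2000)

def Spec_numberOfArrays_i (s : String) (k : Int) (out : Int) : Prop := out = numberOfArrays_i_alt s k
instance (s : String) (k : Int) (out : Int) : Decidable (Spec_numberOfArrays_i s k out) := by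
  unfold Spec_numberOfArrays_i; infer_instance

-- ===== CLAIM (what is proved, stated in full; the proofs are below) =====
def Claim_equal_numberOfArrays_i : Prop := ∀ (s : String) (k : Int), Dom_numberOfArrays_i s k → Pre_numberOfArrays_i s k → Spec_numberOfArrays_i s k (numberOfArrays_i s k)

-- ===== LEMMAS AND PROOFS =====

-- digit value of a digit character
def pvDg (c : Char) : Nat := c.toNat - 48

-- value of the digit window l[i:j] (0 when j ≤ i)
def pvVal (l : List Char) (i : Nat) : Nat → Int
  | 0 => 0
  | j + 1 => if i ≤ j then 10 * pvVal l i j + ((pvDg (l.getD j ' ') : Nat) : Int) else 0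

-- the DP graph's edge: placing the number s[i:j] (nonzero lead digit, value ≤ k)
def pvEdge (l : List Char) (k : Int) (i j : Nat) : Bool :=
  decide (i < j) && decide (j ≤ l.length) && (l.getD i ' ' != '0') && decide (pvVal l i j ≤ k)

-- prefix count: number of valid restorations of l[0:j]  (the DP table, unmodded)
def pvP (l : List Char) (k : Int) : Nat → Nat
  | 0 => 1
  | j + 1 => ∑ i ∈ (Finset.range (j + 1)).attach, if pvEdge l k i.1 (j + 1) then pvP l k i.1 else 0
termination_by j => j
decreasing_by have := Finset.mem_range.mp i.2; omega

-- pvZ u: dp[u] if s[u] != '0' else 0; pvPRE: its prefix sums (B's `pre`, unmodded)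
def pvZ (l : List Char) (k : Int) (u : Nat) : Nat :=
  if l.getD u ' ' = '0' then 0 else pvP l k u

def pvPRE (l : List Char) (k : Int) (t : Nat) : Nat := ∑ u ∈ Finset.range t, pvZ l k u

-- B's fold, named for the invariant lemma (definitionally the fold in the port)
def pvFoldB (l : List Char) (k : Int) (t : Nat) : (Nat → Int) × (Nat → Int) :=
  (List.range' 1 t).foldl (pvStepB l k (pvDigLen k))
    (fun j => if j = 0 then (1 : Int) else 0, fun _ => (0 : Int))

-- PySem.Int.mod at the fixed positive modulus is Int.emod
theorem pvmod (x : Int) : PySem.Int.mod x 1000000007 = x % 1000000007 :=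
  PySem.Int.mod_eq_emod_of_pos (by norm_num)

theorem pvDigitVal (c : Char) (h : c.isDigit = true) :
    ((PySem.Int.digitVal? c).getD 0 : Nat) = pvDg c := by
  simp [PySem.Int.digitVal?, h, pvDg]

theorem pvVal_of_le (l : List Char) (i j : Nat) (h : j ≤ i) : pvVal l i j = 0 := by
  cases j with
  | zero => rfl
  | succ j => simp [pvVal, Nat.not_le.mpr (by omega : j < i)]

theorem pvVal_nonneg (l : List Char) (i : Nat) : ∀ j, 0 ≤ pvVal l i j := by
  intro j
  induction j with
  | zero => simp [pvVal]
  | succ j ih =>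
    by_cases h : i ≤ j
    · simp only [pvVal, if_pos h]
      positivity
    · simp [pvVal, h]

theorem pvVal_le_succ (l : List Char) (i j : Nat) : pvVal l i j ≤ pvVal l i (j + 1) := by
  by_cases h : i ≤ j
  · have h0 := pvVal_nonneg l i j
    have hd : (0 : Int) ≤ ((pvDg (l.getD j ' ') : Nat) : Int) := by positivity
    simp only [pvVal, if_pos h]
    linarith
  · rw [pvVal_of_le l i j (by omega), pvVal_of_le l i (j+1) (by omega)]

theorem pvVal_mono (l : List Char) (i : Nat) {j j' : Nat} (h : j ≤ j') :
    pvVal l i j ≤ pvVal l i j' := by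
  induction j' with
  | zero => simp [Nat.le_zero.mp h]
  | succ j' ih =>
    rcases Nat.lt_or_ge j (j' + 1) with h1 | h1
    · exact le_trans (ih (by omega)) (pvVal_le_succ l i j')
    · have : j = j' + 1 := by omega
      subst this; rfl

theorem pvVal_self (l : List Char) (i : Nat) : pvVal l i i = 0 := pvVal_of_le l i i le_rfl

-- the fold pvInt? performs computes pvVal on digit windows
theorem pvFold_eq (l : List Char) (hd : ∀ c ∈ l, c.isDigit = true) :
    ∀ j i, i ≤ j → j ≤ l.length →
      ((l.drop i).take (j - i)).foldl
        (fun a c => 10 * a + (((PySem.Int.digitVal? c).getD 0 : Nat) : Int)) 0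
      = pvVal l i j := by
  intro j
  induction j with
  | zero => intro i h1 h2; simp [Nat.le_zero.mp h1, pvVal]
  | succ j ih =>
    intro i h1 h2
    rcases Nat.lt_or_ge j i with hlt | hge
    · have hij : i = j + 1 := by omega
      subst hij
      simp [pvVal_of_le l (j + 1) (j + 1) le_rfl]
    · have hjlen : j < l.length := by omega
      have hsplit : (l.drop i).take (j + 1 - i) = (l.drop i).take (j - i) ++ [l[j]] := by
        have h1' : j + 1 - i = (j - i) + 1 := by omega
        rw [h1', List.take_add_one]
        have : (l.drop i)[j - i]? = some l[j] := by
          rw [List.getElem?_drop]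
          have : i + (j - i) = j := by omega
          rw [this, List.getElem?_eq_getElem hjlen]
        simp [this]
      rw [hsplit, List.foldl_append, ih i hge (by omega)]
      simp only [List.foldl]
      rw [pvDigitVal _ (hd _ (List.getElem_mem hjlen))]
      have hgd : l.getD j ' ' = l[j] := List.getD_eq_getElem l ' ' hjlen
      simp only [pvVal, if_pos hge, hgd]

theorem pvInt?_window (l : List Char) (hd : ∀ c ∈ l, c.isDigit = true)
    (i j : Nat) (hij : i < j) (hj : j ≤ l.length) :
    pvInt? (PySem.List.slice l (some (i : Int)) (some (j : Int))) = some (pvVal l i j) := by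
  rw [PySem.List.slice_natCast]
  have hne : (l.drop i).take (j - i) ≠ [] := by
    apply List.ne_nil_of_length_pos
    simp only [List.length_take, List.length_drop]
    omega
  have hall : ((l.drop i).take (j - i)).all Char.isDigit = true := by
    rw [List.all_eq_true]
    intro c hc
    exact hd c (List.mem_of_mem_drop (List.mem_of_mem_take hc))
  rw [pvInt?, if_pos ⟨hne, hall⟩, pvFold_eq l hd j i (by omega) hj]

theorem pvEdge_iff (l : List Char) (k : Int) (i j : Nat) :
    pvEdge l k i j = true ↔ i < j ∧ j ≤ l.length ∧ l.getD i ' ' ≠ '0' ∧ pvVal l i j ≤ k := by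
  simp [pvEdge, and_assoc]

theorem pvP_succ (l : List Char) (k : Int) (j : Nat) :
    pvP l k (j + 1) = ∑ i ∈ Finset.range (j + 1), if pvEdge l k i (j + 1) then pvP l k i else 0 := by
  rw [pvP]
  exact Finset.sum_attach (Finset.range (j + 1)) (fun i => if pvEdge l k i (j + 1) then pvP l k i else 0)

theorem pvEdge_false_of_zero (l : List Char) (k : Int) (i j : Nat)
    (h0 : l.getD i ' ' = '0') : pvEdge l k i j = false := by
  simp only [pvEdge, h0]
  simp

-- ===== A-side: the push-DP table =====

-- value of A's dp[j] after the outer loop has processed starts 0, …, t-1 (unmodded)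
def pvAccA (l : List Char) (k : Int) (t j : Nat) : Nat :=
  (if j = 0 then 1 else 0) + ∑ i ∈ Finset.range (min t j), if pvEdge l k i j then pvP l k i else 0

theorem pvAccA_self (l : List Char) (k : Int) (t : Nat) : pvAccA l k t t = pvP l k t := by
  cases t with
  | zero =>
    have hP0 : pvP l k 0 = 1 := by rw [pvP]
    simp [pvAccA, hP0]
  | succ u => simp [pvAccA, pvP_succ]

-- the dp cell j is unchanged by processing start = t when the edge (t, j) is absent
theorem pvAccA_step (l : List Char) (k : Int) (t j : Nat) (h : pvEdge l k t j = false) :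
    pvAccA l k (t + 1) j = pvAccA l k t j := by
  unfold pvAccA
  by_cases hj : t < j
  · rw [Nat.min_eq_left (by omega), Nat.min_eq_left (by omega), Finset.sum_range_succ, h]
    simp
  · rw [Nat.min_eq_right (by omega), Nat.min_eq_right (by omega)]

theorem pvAccA_add (l : List Char) (k : Int) (t j : Nat) (h : pvEdge l k t j = true) :
    pvAccA l k (t + 1) j = pvAccA l k t j + pvP l k t := by
  have hj : t < j := ((pvEdge_iff l k t j).mp h).1
  unfold pvAccA
  rw [Nat.min_eq_left (by omega), Nat.min_eq_left (by omega), Finset.sum_range_succ, h]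
  simp [add_assoc]

theorem innerA_spec (l : List Char) (k : Int) (hd : ∀ c ∈ l, c.isDigit = true) (t : Nat) :
    ∀ n e dp, l.length - e ≤ n → t ≤ e →
      pvInnerA l k t e dp = fun j =>
        if e < j ∧ j ≤ l.length ∧ pvVal l t j ≤ k
        then (dp j + dp t) % 1000000007 else dp j := by
  intro n
  induction n with
  | zero =>
    intro e dp hle _
    rw [pvInnerA, dif_neg (by omega : ¬ e < l.length)]
    funext j
    rw [if_neg (by omega)]
  | succ n ih =>
    intro e dp hle hte
    by_cases he : e < l.length
    · rw [pvInnerA, dif_pos he]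
      have hcast : ((e : Int) + 1) = (((e + 1 : Nat) : Nat) : Int) := by push_cast; ring
      rw [hcast, pvInt?_window l hd t (e + 1) (by omega) (by omega)]
      dsimp only
      by_cases hk : pvVal l t (e + 1) > k
      · rw [if_pos hk]
        funext j
        rw [if_neg]
        rintro ⟨h1, h2, h3⟩
        have h4 : pvVal l t (e + 1) ≤ pvVal l t j := pvVal_mono l t (by omega)
        linarith
      · rw [if_neg hk]
        rw [ih (e + 1) _ (by omega) (by omega)]
        funext j
        dsimp only
        rw [if_neg (by omega : ¬ t = e + 1)]
        by_cases hj1 : j = e + 1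
        · subst hj1
          rw [if_neg (by rintro ⟨a, -, -⟩; omega)]
          rw [if_pos rfl, pvmod,
            if_pos (show e < e + 1 ∧ e + 1 ≤ l.length ∧ pvVal l t (e + 1) ≤ k from
              ⟨by omega, by omega, by linarith⟩)]
        · simp only [if_neg hj1]
          by_cases hc1 : e + 1 < j ∧ j ≤ l.length ∧ pvVal l t j ≤ k
          · rw [if_pos hc1,
              if_pos (show e < j ∧ j ≤ l.length ∧ pvVal l t j ≤ k from
                ⟨by omega, hc1.2.1, hc1.2.2⟩)]
          · rw [if_neg hc1, if_neg (by rintro ⟨a, b, c⟩; exact hc1 ⟨by omega, b, c⟩)]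
    · rw [pvInnerA, dif_neg he]
      funext j
      rw [if_neg (by omega)]

theorem outerA (l : List Char) (k : Int) (hd : ∀ c ∈ l, c.isDigit = true) :
    ∀ t, t ≤ l.length → ∀ j,
      ((List.range t).foldl
        (fun dp start => if l.getD start ' ' = '0' then dp else pvInnerA l k start start dp)
        (fun j => if j = 0 then (1 : Int) else 0)) j
      = ((pvAccA l k t j : Nat) : Int) % 1000000007 := by
  intro t
  induction t with
  | zero =>
    intro _ j
    simp only [List.range_zero, List.foldl_nil, pvAccA, Nat.min_comm, Nat.min_zero,
      Finset.range_zero, Finset.sum_empty, Nat.add_zero]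
    by_cases hj : j = 0 <;> simp [hj]
  | succ t ih =>
    intro ht j
    rw [List.range_succ, List.foldl_append, List.foldl_cons, List.foldl_nil]
    have hdp := ih (by omega)
    by_cases h0 : l.getD t ' ' = '0'
    · rw [if_pos h0, hdp j, pvAccA_step l k t j (pvEdge_false_of_zero l k t j h0)]
    · rw [if_neg h0]
      rw [innerA_spec l k hd t l.length t _ (by omega) le_rfl]
      dsimp only
      by_cases hc : t < j ∧ j ≤ l.length ∧ pvVal l t j ≤ k
      · rw [if_pos hc, hdp j, hdp t, pvAccA_self]
        have hedge : pvEdge l k t j = true :=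
          (pvEdge_iff l k t j).mpr ⟨hc.1, hc.2.1, h0, hc.2.2⟩
        rw [pvAccA_add l k t j hedge]
        push_cast
        conv_rhs => rw [Int.add_emod]
      · rw [if_neg hc, hdp j]
        have hedge : pvEdge l k t j = false := by
          rw [Bool.eq_false_iff]
          intro hE
          obtain ⟨a, b, -, c⟩ := (pvEdge_iff l k t j).mp hE
          exact hc ⟨a, b, c⟩
        rw [pvAccA_step l k t j hedge]

-- ===== B-side: digit-length bounds and the window characterisation =====

theorem pvDg_le (c : Char) (h : c.isDigit = true) : pvDg c ≤ 9 := by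
  simp [Char.isDigit] at h
  obtain ⟨h1, h2⟩ := h
  rw [UInt32.le_iff_toNat_le] at h1 h2
  have e2 : (57:UInt32).toNat = 57 := rfl
  unfold pvDg Char.toNat
  omega

theorem pvDg_pos (c : Char) (h : c.isDigit = true) (h0 : c ≠ '0') : 1 ≤ pvDg c := by
  simp [Char.isDigit] at h
  obtain ⟨h1, h2⟩ := h
  rw [UInt32.le_iff_toNat_le] at h1 h2
  have e1 : (48:UInt32).toNat = 48 := rfl
  have hne : c.val.toNat ≠ 48 := by
    intro hc
    exact h0 (Char.ext (UInt32.toNat_inj.mp (by rw [hc]; rfl)))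
  unfold pvDg Char.toNat
  omega

theorem pvDigitAt (l : List Char) (hd : ∀ c ∈ l, c.isDigit = true) (i : Nat) (h : i < l.length) :
    (l.getD i ' ').isDigit = true := by
  rw [List.getD_eq_getElem l ' ' h]
  exact hd _ (List.getElem_mem h)

theorem pvDigLen_pos (k : Int) (hk : 1 ≤ k) : 1 ≤ pvDigLen k := by
  rw [pvDigLen, dif_pos (by omega : (0:Int) < k)]
  omega

theorem pvDigLen_bounds_aux : ∀ n : Nat, ∀ k : Int, k.toNat ≤ n → 1 ≤ k →
    (10:Int) ^ (pvDigLen k - 1) ≤ k ∧ k < 10 ^ pvDigLen k := by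
  intro n
  induction n with
  | zero => intro k hn hk; omega
  | succ n ih =>
    intro k hn hk
    rw [pvDigLen, dif_pos (by omega : (0:Int) < k),
      PySem.Int.floordiv_eq_ediv_of_pos (by norm_num : (0:Int) < 10)]
    by_cases hq : k / 10 = 0
    · have h9 : k < 10 := by omega
      rw [hq]
      have : pvDigLen 0 = 0 := by rw [pvDigLen]; norm_num
      rw [this]
      norm_num
      omega
    · have hq1 : 1 ≤ k / 10 := by omega
      obtain ⟨h1, h2⟩ := ih (k / 10) (by omega) hq1
      have hd1 : 1 ≤ pvDigLen (k / 10) := by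
        rw [pvDigLen, dif_pos (by omega : (0:Int) < k / 10)]; omega
      constructor
      · have hp : (10:Int) ^ (pvDigLen (k / 10) + 1 - 1) = 10 ^ (pvDigLen (k / 10) - 1) * 10 := by
          rw [← pow_succ]
          congr 1
          omega
        rw [hp]
        have : (10:Int) ^ (pvDigLen (k / 10) - 1) * 10 ≤ (k / 10) * 10 :=
          mul_le_mul_of_nonneg_right h1 (by norm_num)
        omega
      · have hp : (10:Int) ^ (pvDigLen (k / 10) + 1) = 10 ^ pvDigLen (k / 10) * 10 := pow_succ 10 _
        rw [hp]
        have : (k / 10 + 1) * 10 ≤ (10:Int) ^ pvDigLen (k / 10) * 10 :=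
          mul_le_mul_of_nonneg_right (by omega) (by norm_num)
        omega

theorem pvDigLen_bounds (k : Int) (hk : 1 ≤ k) :
    (10:Int) ^ (pvDigLen k - 1) ≤ k ∧ k < 10 ^ pvDigLen k :=
  pvDigLen_bounds_aux k.toNat k le_rfl hk

-- any window of digits is < 10^(its length)
theorem pvVal_lt (l : List Char) (hd : ∀ c ∈ l, c.isDigit = true) (j : Nat) :
    ∀ i, i ≤ l.length → pvVal l j i < (10:Int) ^ (i - j) := by
  intro i
  induction i with
  | zero => intro _; simp [pvVal]
  | succ i ih =>
    intro h
    by_cases hji : j ≤ i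
    · simp only [pvVal, if_pos hji]
      have hv := ih (by omega)
      have hdg : ((pvDg (l.getD i ' ') : Nat) : Int) ≤ 9 := by
        exact_mod_cast pvDg_le _ (pvDigitAt l hd i (by omega))
      have hp : (10:Int) ^ (i + 1 - j) = 10 ^ (i - j) * 10 := by
        rw [← pow_succ]; congr 1; omega
      rw [hp]
      linarith
    · simp only [pvVal, if_neg hji]
      positivity

-- a window with a nonzero leading digit is ≥ 10^(its length - 1)
theorem pvVal_ge (l : List Char) (hd : ∀ c ∈ l, c.isDigit = true) (j : Nat)
    (h0 : l.getD j ' ' ≠ '0') :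
    ∀ i, j < i → i ≤ l.length → (10:Int) ^ (i - j - 1) ≤ pvVal l j i := by
  intro i
  induction i with
  | zero => omega
  | succ i ih =>
    intro h1 h2
    by_cases hji : j = i
    · subst hji
      simp only [pvVal, if_pos le_rfl, pvVal_self]
      have hdg : (1:Int) ≤ ((pvDg (l.getD j ' ') : Nat) : Int) := by
        exact_mod_cast pvDg_pos _ (pvDigitAt l hd j (by omega)) h0
      have he : j + 1 - j - 1 = 0 := by omega
      rw [he, pow_zero]
      linarith
    · have hv := ih (by omega) (by omega)
      simp only [pvVal, if_pos (by omega : j ≤ i)]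
      have hdg : (0:Int) ≤ ((pvDg (l.getD i ' ') : Nat) : Int) := by positivity
      have hp : (10:Int) ^ (i + 1 - j - 1) = 10 ^ (i - j - 1) * 10 := by
        rw [← pow_succ]; congr 1; omega
      rw [hp]
      linarith

-- the window characterisation of the DP recurrence (for k ≥ 1, L its digit count):
-- windows shorter than L always count, the one full-length window needs the test
theorem pvP_window (l : List Char) (k : Int) (hd : ∀ c ∈ l, c.isDigit = true) (hk : 1 ≤ k)
    (t : Nat) (ht1 : 1 ≤ t) (ht2 : t ≤ l.length) :
    pvP l k t = (∑ u ∈ Finset.Ico (t - (pvDigLen k - 1)) t, pvZ l k u)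
      + (if pvDigLen k ≤ t ∧ l.getD (t - pvDigLen k) ' ' ≠ '0' ∧ pvVal l (t - pvDigLen k) t ≤ k
         then pvP l k (t - pvDigLen k) else 0) := by
  obtain ⟨hb1, hb2⟩ := pvDigLen_bounds k hk
  have hL1 : 1 ≤ pvDigLen k := pvDigLen_pos k hk
  set L := pvDigLen k with hLdef
  obtain ⟨t', rfl⟩ : ∃ t', t = t' + 1 := ⟨t - 1, by omega⟩
  rw [pvP_succ]
  have fshort : ∀ j, j < t' + 1 → t' + 1 - j < L →
      (if pvEdge l k j (t' + 1) then pvP l k j else 0) = pvZ l k j := by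
    intro j hj hlen
    by_cases h0 : l.getD j ' ' = '0'
    · rw [pvEdge_false_of_zero l k j _ h0, pvZ, if_pos h0]
      simp
    · have hlt := pvVal_lt l hd j (t' + 1) ht2
      have hmono : (10:Int) ^ (t' + 1 - j) ≤ 10 ^ (L - 1) :=
        pow_le_pow_right₀ (by norm_num) (by omega)
      rw [if_pos ((pvEdge_iff l k j (t' + 1)).mpr ⟨hj, ht2, h0, by linarith⟩), pvZ, if_neg h0]
  have flong : ∀ j, j < t' + 1 → L < t' + 1 - j →
      (if pvEdge l k j (t' + 1) then pvP l k j else 0) = 0 := by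
    intro j hj hlen
    by_cases h0 : l.getD j ' ' = '0'
    · rw [pvEdge_false_of_zero l k j _ h0]
      simp
    · have hge := pvVal_ge l hd j h0 (t' + 1) (by omega) ht2
      have hmono : (10:Int) ^ L ≤ 10 ^ (t' + 1 - j - 1) :=
        pow_le_pow_right₀ (by norm_num) (by omega)
      have hE : pvEdge l k j (t' + 1) = false := by
        rw [Bool.eq_false_iff]
        intro hE
        obtain ⟨-, -, -, hv⟩ := (pvEdge_iff l k j (t' + 1)).mp hE
        linarith
      rw [hE]
      simp
  rw [Finset.range_eq_Ico]
  by_cases hLt : L ≤ t' + 1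
  · have hlo : t' + 1 - (L - 1) = t' + 1 - L + 1 := by omega
    rw [hlo,
      ← Finset.sum_Ico_consecutive (fun i => if pvEdge l k i (t' + 1) then pvP l k i else 0)
        (by omega : 0 ≤ t' + 1 - L) (by omega : t' + 1 - L ≤ t' + 1),
      Finset.sum_eq_sum_Ico_succ_bot (show t' + 1 - L < t' + 1 by omega)]
    have hz1 : (∑ j ∈ Finset.Ico 0 (t' + 1 - L),
        if pvEdge l k j (t' + 1) then pvP l k j else 0) = 0 :=
      Finset.sum_eq_zero (fun j hj => flong j (by have := Finset.mem_Ico.mp hj; omega)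
        (by have := Finset.mem_Ico.mp hj; omega))
    have hz2 : (∑ j ∈ Finset.Ico (t' + 1 - L + 1) (t' + 1),
        if pvEdge l k j (t' + 1) then pvP l k j else 0)
        = ∑ u ∈ Finset.Ico (t' + 1 - L + 1) (t' + 1), pvZ l k u :=
      Finset.sum_congr rfl (fun j hj => fshort j (by have := Finset.mem_Ico.mp hj; omega)
        (by have := Finset.mem_Ico.mp hj; omega))
    have hmid : (if pvEdge l k (t' + 1 - L) (t' + 1) then pvP l k (t' + 1 - L) else 0)
        = if L ≤ t' + 1 ∧ l.getD (t' + 1 - L) ' ' ≠ '0' ∧ pvVal l (t' + 1 - L) (t' + 1) ≤ k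
          then pvP l k (t' + 1 - L) else 0 := by
      by_cases hc : l.getD (t' + 1 - L) ' ' ≠ '0' ∧ pvVal l (t' + 1 - L) (t' + 1) ≤ k
      · rw [if_pos ((pvEdge_iff l k (t' + 1 - L) (t' + 1)).mpr ⟨by omega, ht2, hc.1, hc.2⟩),
          if_pos ⟨hLt, hc⟩]
      · have hE : pvEdge l k (t' + 1 - L) (t' + 1) = false := by
          rw [Bool.eq_false_iff]
          intro hE
          obtain ⟨-, -, a, b⟩ := (pvEdge_iff l k (t' + 1 - L) (t' + 1)).mp hE
          exact hc ⟨a, b⟩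
        rw [hE]
        simp only [Bool.false_eq_true, if_false]
        rw [if_neg (fun h => hc ⟨h.2.1, h.2.2⟩)]
    rw [hz1, hz2, hmid]
    ring
  · have hlo : t' + 1 - (L - 1) = 0 := by omega
    rw [hlo, if_neg (fun h => hLt h.1), add_zero]
    exact Finset.sum_congr rfl (fun j hj => fshort j (by have := Finset.mem_Ico.mp hj; omega)
      (by have := Finset.mem_Ico.mp hj; omega))

-- with k < 1 no window is ever valid
theorem pvP_zero (l : List Char) (k : Int) (hd : ∀ c ∈ l, c.isDigit = true) (hk : k < 1)
    (t : Nat) (ht1 : 1 ≤ t) (ht2 : t ≤ l.length) : pvP l k t = 0 := by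
  obtain ⟨t', rfl⟩ : ∃ t', t = t' + 1 := ⟨t - 1, by omega⟩
  rw [pvP_succ]
  apply Finset.sum_eq_zero
  intro j hj
  have hj' := Finset.mem_range.mp hj
  by_cases h0 : l.getD j ' ' = '0'
  · rw [pvEdge_false_of_zero l k j _ h0]
    simp
  · have hge := pvVal_ge l hd j h0 (t' + 1) (by omega) ht2
    have hpow : (1:Int) ≤ 10 ^ (t' + 1 - j - 1) := one_le_pow₀ (by norm_num)
    have hE : pvEdge l k j (t' + 1) = false := by
      rw [Bool.eq_false_iff]
      intro hE
      obtain ⟨-, -, -, hv⟩ := (pvEdge_iff l k j (t' + 1)).mp hE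
      linarith
    rw [hE]
    simp

-- B's loop invariant: dp j holds pvP j mod p and pre j holds pvPRE j mod p
theorem outerB_inv (l : List Char) (k : Int) (hd : ∀ c ∈ l, c.isDigit = true) (hk : 1 ≤ k) :
    ∀ t, t ≤ l.length →
      (∀ j, j ≤ t → (pvFoldB l k t).1 j = ((pvP l k j : Nat) : Int) % 1000000007) ∧
      (∀ j, j ≤ t → (pvFoldB l k t).2 j = ((pvPRE l k j : Nat) : Int) % 1000000007) := by
  intro t
  induction t with
  | zero =>
    intro _
    constructor
    · intro j hj
      have hj0 : j = 0 := by omega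
      subst hj0
      have hP0 : pvP l k 0 = 1 := by rw [pvP]
      simp [pvFoldB, hP0]
    · intro j hj
      have hj0 : j = 0 := by omega
      subst hj0
      simp [pvFoldB, pvPRE]
  | succ t ih =>
    intro ht
    obtain ⟨ihd, ihp⟩ := ih (by omega)
    have hL1 : 1 ≤ pvDigLen k := pvDigLen_pos k hk
    have hfold : pvFoldB l k (t + 1) = pvStepB l k (pvDigLen k) (pvFoldB l k t) (t + 1) := by
      unfold pvFoldB
      rw [List.range'_1_concat, List.foldl_append, List.foldl_cons, List.foldl_nil,
        Nat.add_comm 1 t]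
    rw [hfold]
    simp only [pvStepB, Nat.add_sub_cancel]
    -- the new prefix-sum cell
    have hz : (if l.getD t ' ' = '0' then (0:Int) else (pvFoldB l k t).1 t)
        = ((pvZ l k t : Nat) : Int) % 1000000007 := by
      by_cases h0 : l.getD t ' ' = '0'
      · rw [if_pos h0, pvZ, if_pos h0]
        norm_num
      · rw [if_neg h0, pvZ, if_neg h0, ihd t le_rfl]
    have hprenew : PySem.Int.mod ((pvFoldB l k t).2 t
          + (if l.getD t ' ' = '0' then (0:Int) else (pvFoldB l k t).1 t)) 1000000007
        = ((pvPRE l k (t + 1) : Nat) : Int) % 1000000007 := by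
      rw [hz, ihp t le_rfl, pvmod]
      have hs : pvPRE l k (t + 1) = pvPRE l k t + pvZ l k t := by
        unfold pvPRE
        rw [Finset.sum_range_succ]
      have hs' : ((pvPRE l k (t + 1) : Nat) : Int) = (pvPRE l k t : Nat) + (pvZ l k t : Nat) := by
        exact_mod_cast congrArg (Nat.cast : Nat → Int) hs
      omega
    constructor
    · intro j hj
      by_cases hj1 : j = t + 1
      · subst hj1
        rw [if_pos rfl]
        simp only [if_true]
        have hlole : t + 1 - (pvDigLen k - 1) ≤ t + 1 := by omega
        have hpre2 : (if t + 1 - (pvDigLen k - 1) = t + 1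
              then PySem.Int.mod ((pvFoldB l k t).2 t
                + (if l.getD t ' ' = '0' then (0:Int) else (pvFoldB l k t).1 t)) 1000000007
              else (pvFoldB l k t).2 (t + 1 - (pvDigLen k - 1)))
            = ((pvPRE l k (t + 1 - (pvDigLen k - 1)) : Nat) : Int) % 1000000007 := by
          by_cases hl : t + 1 - (pvDigLen k - 1) = t + 1
          · rw [if_pos hl, hl]
            exact hprenew
          · rw [if_neg hl]
            exact ihp _ (by omega)
        rw [hpre2, hprenew]
        -- the full-length window test, rewritten through pvInt?_window
        have hFull : pvFullOk l k (pvDigLen k) (t + 1)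
            = decide (pvVal l (t + 1 - pvDigLen k) (t + 1) ≤ k) := by
          unfold pvFullOk
          rw [pvInt?_window l hd (t + 1 - pvDigLen k) (t + 1) (by omega) (by omega)]
        have hcond : (pvDigLen k ≤ t + 1 ∧ l.getD (t + 1 - pvDigLen k) ' ' ≠ '0' ∧
              pvFullOk l k (pvDigLen k) (t + 1) = true)
            ↔ (pvDigLen k ≤ t + 1 ∧ l.getD (t + 1 - pvDigLen k) ' ' ≠ '0' ∧
              pvVal l (t + 1 - pvDigLen k) (t + 1) ≤ k) := by
          rw [hFull]
          simp
        have hwin := pvP_window l k hd hk (t + 1) (by omega) ht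
        have hsum : pvPRE l k (t + 1 - (pvDigLen k - 1))
              + (∑ u ∈ Finset.Ico (t + 1 - (pvDigLen k - 1)) (t + 1), pvZ l k u)
            = pvPRE l k (t + 1) := by
          unfold pvPRE
          rw [Finset.range_eq_Ico]
          exact Finset.sum_Ico_consecutive _ (Nat.zero_le _) hlole
        have hsum' : ((pvPRE l k (t + 1) : Nat) : Int)
            = ((pvPRE l k (t + 1 - (pvDigLen k - 1)) : Nat) : Int)
              + ((∑ u ∈ Finset.Ico (t + 1 - (pvDigLen k - 1)) (t + 1), pvZ l k u : Nat) : Int) := by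
          exact_mod_cast congrArg (Nat.cast : Nat → Int) hsum.symm
        rw [pvmod]
        by_cases hc : pvDigLen k ≤ t + 1 ∧ l.getD (t + 1 - pvDigLen k) ' ' ≠ '0' ∧
            pvVal l (t + 1 - pvDigLen k) (t + 1) ≤ k
        · rw [if_pos (hcond.mpr hc), ihd (t + 1 - pvDigLen k) (by omega), hwin, if_pos hc,
            Nat.cast_add]
          omega
        · rw [if_neg (fun h => hc (hcond.mp h)), hwin, if_neg hc, Nat.add_zero]
          omega
      · rw [if_neg hj1]
        exact ihd j (by omega)
    · intro j hj
      by_cases hj1 : j = t + 1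
      · subst hj1
        simp only [if_true]
        exact hprenew
      · simp only [if_neg hj1]
        exact ihp j (by omega)

-- ===== VERDICT (by name: the statement is the Claim_ definition above) =====
theorem numberOfArrays_i_spec : Claim_equal_numberOfArrays_i := by
  intro s k _hDom hPre
  unfold Pre_numberOfArrays_i at hPre
  rw [List.all_eq_true] at hPre
  unfold Spec_numberOfArrays_i numberOfArrays_i numberOfArrays_i_alt
  show ((List.range s.toList.length).foldl
      (fun dp start => if s.toList.getD start ' ' = '0' then dp
        else pvInnerA s.toList k start start dp)
      (fun j => if j = 0 then (1 : Int) else 0)) s.toList.length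
    = (if k < 1 then (if s.toList.length = 0 then (1 : Int) else 0)
       else (pvFoldB s.toList k s.toList.length).1 s.toList.length)
  rw [outerA s.toList k hPre s.toList.length le_rfl s.toList.length, pvAccA_self]
  by_cases hk : k < 1
  · rw [if_pos hk]
    rcases Nat.eq_zero_or_pos s.toList.length with h0 | h0
    · rw [if_pos h0, h0]
      norm_num [pvP]
    · rw [if_neg (by omega), pvP_zero s.toList k hPre hk s.toList.length (by omega) le_rfl]
      norm_num
  · rw [if_neg hk]
    have := (outerB_inv s.toList k hPre (by omega) s.toList.length le_rfl).1
      s.toList.length le_rfl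
    exact (this.symm : _)
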